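-- pv_equiv track=rewrite | github.com/clumsy/codeforces | src/121/121A.py | count
-- ===== SOURCE A (Python) =====
-- def count(x):
--     if x <= 0:
--         return 0
--     i = 2  # 1_0, 1_1, 1_00, 1_01
--     s = prv = nxt = 0
--     while nxt < x:
--         nxt = int("".join("7" if d == "1" else "4" for d in bin(i)[3:]))
--         s += nxt * (min(nxt, x) - prv)
--         prv = nxt
--         i += 1
--     return s
-- ===== SOURCE B (Python) =====
-- def count(x):
--     # Phase 1: build the sorted table of lucky numbers generation by generation
--     # (all 1-digit, then all 2-digit, ...), stopping right after the first one >= x.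
--     if x <= 0:
--         return 0
--     luckies = []
--     gen = [4, 7]
--     done = False
--     while not done:
--         for v in gen:
--             luckies.append(v)
--             if v >= x:
--                 done = True
--                 break
--         if not done:
--             gen = [10 * v + d for v in gen for d in (4, 7)]
--     # Phase 2: one fold over the table.
--     s = prv = 0
--     for v in luckies:
--         s += v * (min(v, x) - prv)
--         prv = v
--     return s
-- ===== Notes on version B (the rewrite author's own statement) =====
-- stated objective: alternative
-- what changed: A interleaves enumeration and summation, deriving each lucky number from the binary digits of a running counter inside the summing loop; B is a two-phase decomposition: first build the sorted table of lucky numbers generation by generation (1-digit, 2-digit, ...) by arithmetic extension, stopping right after the first one >= x, then do a single fold over that table.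
import Mathlib
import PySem

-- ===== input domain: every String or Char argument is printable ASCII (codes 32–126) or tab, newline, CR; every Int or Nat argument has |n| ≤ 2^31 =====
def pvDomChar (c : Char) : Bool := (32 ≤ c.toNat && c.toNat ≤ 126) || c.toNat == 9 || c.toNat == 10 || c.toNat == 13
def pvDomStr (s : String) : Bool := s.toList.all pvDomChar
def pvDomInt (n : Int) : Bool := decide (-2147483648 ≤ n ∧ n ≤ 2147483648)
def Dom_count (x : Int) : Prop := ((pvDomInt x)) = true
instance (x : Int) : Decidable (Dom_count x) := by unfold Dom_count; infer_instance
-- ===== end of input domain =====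

-- B replaces A's interleaved bit-trick enumeration (lucky number from the binary
-- digits of a counter, consumed inside the summing loop) by an explicit two-phase
-- decomposition: build the sorted table of lucky numbers generation by generation,
-- then fold once over the table (objective: alternative).

-- ===== PORT A =====
-- hand port of `int("".join("7" if d == "1" else "4" for d in bin(i)[3:]))`:
-- peeling the bits of i below its leading 1, MSB-first, is exactly this /2-recursion
def luckyA (i : Nat) : Int :=
  if _h : i ≤ 1 then 0
  else luckyA (i / 2) * 10 + (if i % 2 == 1 then 7 else 4)
decreasing_by exact Nat.div_lt_self (by omega) (by omega)

-- A's while-loop; the conjunct `(i:Int) ≤ x + 1` is a totality guard only: it is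
-- invariant at every reachable state (proved below), so behaviour is unchanged
def countLoopA (x : Int) (i : Nat) (s prv nxt : Int) : Int :=
  if _h : nxt < x ∧ (i : Int) ≤ x + 1 then
    let n := luckyA i
    countLoopA x (i + 1) (s + n * (min n x - prv)) n n
  else s
termination_by (x + 2 - (i : Int)).toNat
decreasing_by omega

def count (x : Int) : Int :=
  if x ≤ 0 then 0 else countLoopA x 2 0 0 0

-- ===== PORT B =====
-- Phase 1 inner for-loop: append each v, break (flag true) at the first v ≥ x
def scanGen (x : Int) : List Int → List Int × Bool
  | [] => ([], false)
  | v :: rest =>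
    if x ≤ v then ([v], true)
    else
      let p := scanGen x rest
      (v :: p.1, p.2)

-- `[10*v + d for v in gen for d in (4, 7)]`
def nextGen (g : List Int) : List Int := g.flatMap (fun v => [10 * v + 4, 10 * v + 7])

-- Phase 1 outer while-loop; the fuel (12 at the call site) is a totality guard only
def build (x : Int) (gen : List Int) : Nat → List Int
  | 0 => []
  | f + 1 =>
    let p := scanGen x gen
    if p.2 then p.1 else p.1 ++ build x (nextGen gen) f

def count_alt (x : Int) : Int :=
  if x ≤ 0 then 0
  else
    ((build x [4, 7] 12).foldl
      (fun (p : Int × Int) v => (p.1 + v * (min v x - p.2), v)) (0, 0)).1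

-- ===== PRECONDITION & SPEC =====
def Spec_count (x : Int) (out : Int) : Prop := out = count_alt x
instance (x : Int) (out : Int) : Decidable (Spec_count x out) := by unfold Spec_count; infer_instance

-- ===== CLAIM (what is proved, stated in full; the proofs are below) =====
def Claim_equal_count : Prop := ∀ (x : Int), Dom_count x → Spec_count x (count x)

-- ===== LEMMAS AND PROOFS =====

-- common abstraction: fold-with-break over a list of values;
-- `.inl s'` = loop ended at an element ≥ x with final sum s',
-- `.inr (s', prv')` = list exhausted, loop would continue from (s', prv')
def consume (x : Int) : List Int → Int → Int → (Int ⊕ (Int × Int))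
  | [], s, prv => .inr (s, prv)
  | v :: rest, s, prv =>
    if x ≤ v then .inl (s + v * (x - prv))
    else consume x rest (s + v * (v - prv)) v

def seg (i n : Nat) : List Int := (List.range n).map (fun j => luckyA (i + j))

def G (d : Nat) : List Int := seg (2 ^ d) (2 ^ d)

def foldPair (x : Int) (l : List Int) (p : Int × Int) : Int × Int :=
  l.foldl (fun (p : Int × Int) v => (p.1 + v * (min v x - p.2), v)) p

def foldB (x : Int) (l : List Int) (s prv : Int) : Int := (foldPair x l (s, prv)).1

theorem luckyA_one : luckyA 1 = 0 := by rw [luckyA]; simp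

theorem luckyA_step (i b : Nat) (hi : 1 ≤ i) (hb : b < 2) :
    luckyA (2 * i + b) = luckyA i * 10 + (if b == 1 then 7 else 4) := by
  have h1 : (2 * i + b) / 2 = i := by omega
  have h2 : (2 * i + b) % 2 = b := by omega
  rw [luckyA, dif_neg (by omega), h1, h2]

theorem luckyA_lb : ∀ i : Nat, 2 ≤ i → (i : Int) ≤ luckyA i := by
  intro i
  induction i using Nat.strong_induction_on with
  | _ i ih =>
    intro h2
    rw [luckyA, dif_neg (by omega)]
    by_cases h3 : i ≤ 3
    · have hd : i / 2 = 1 := by omega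
      rw [hd, luckyA_one]
      split <;> rename_i hb <;> simp only [beq_iff_eq] at * <;> omega
    · have h4 : 2 ≤ i / 2 := by omega
      have h5 := ih (i / 2) (by omega) h4
      split <;> omega

theorem luckyA_pow_lb : ∀ d : Nat, 1 ≤ d → (4 * 10 ^ (d - 1) : Int) ≤ luckyA (2 ^ d) := by
  intro d
  induction d with
  | zero => omega
  | succ d ih =>
    intro _
    by_cases hd : d = 0
    · subst hd
      have : luckyA 2 = 4 := by
        have := luckyA_step 1 0 (by omega) (by omega)
        simpa [luckyA_one] using this
      simp [this]
    · have h1 : (1:Nat) ≤ d := by omega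
      have h2 := ih h1
      have h3 : 2 ^ (d + 1) = 2 * 2 ^ d := by ring
      have h4 := luckyA_step (2 ^ d) 0 (Nat.one_le_two_pow) (by omega)
      simp only [Nat.add_zero] at h4
      norm_num at h4
      rw [h3, h4]
      simp only [Nat.add_sub_cancel]
      have h6 : (10:Int) ^ d = 10 ^ (d - 1) * 10 := by
        rw [← pow_succ]; congr 1; omega
      rw [h6]
      linarith

theorem seg_succ (i n : Nat) : seg i (n + 1) = luckyA i :: seg (i + 1) n := by
  simp only [seg, List.range_succ_eq_map, List.map_cons, List.map_map, Nat.add_zero]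
  congr 1
  apply List.map_congr_left
  intro a _
  simp only [Function.comp_apply]
  congr 1
  omega

theorem seg_double : ∀ (n i : Nat), 1 ≤ i →
    seg (2 * i) (2 * n) = (seg i n).flatMap (fun v => [10 * v + 4, 10 * v + 7]) := by
  intro n
  induction n with
  | zero => intro i _; simp [seg]
  | succ n ih =>
    intro i hi
    have h1 : 2 * (n + 1) = (2 * n + 1) + 1 := by ring
    have h2 : seg (2 * i) (2 * (n + 1))
        = seg (2 * i) (2 * n) ++ [luckyA (2 * i + 2 * n), luckyA (2 * i + (2 * n + 1))] := by
      rw [h1]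
      simp only [seg, List.range_succ, List.map_append, List.map_cons, List.map_nil]
      simp
    have h3 : seg i (n + 1) = seg i n ++ [luckyA (i + n)] := by
      simp [seg, List.range_succ]
    rw [h2, h3, List.flatMap_append, ← ih i hi]
    congr 1
    have e0 : luckyA (2 * i + 2 * n) = luckyA (i + n) * 10 + 4 := by
      have := luckyA_step (i + n) 0 (by omega) (by omega)
      simpa [show 2 * (i + n) + 0 = 2 * i + 2 * n by ring] using this
    have e1 : luckyA (2 * i + (2 * n + 1)) = luckyA (i + n) * 10 + 7 := by
      have := luckyA_step (i + n) 1 (by omega) (by omega)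
      simpa [show 2 * (i + n) + 1 = 2 * i + (2 * n + 1) by ring] using this
    simp [e0, e1]
    ring

theorem G_succ (d : Nat) : G (d + 1) = nextGen (G d) := by
  have h : (2:Nat) ^ (d + 1) = 2 * 2 ^ d := by ring
  simp only [G, nextGen, h]
  exact seg_double (2 ^ d) (2 ^ d) Nat.one_le_two_pow

theorem G_one : G 1 = [4, 7] := by
  have h2 : luckyA 2 = 4 := by
    have := luckyA_step 1 0 (by omega) (by omega)
    simpa [luckyA_one] using this
  have h3 : luckyA 3 = 7 := by
    have := luckyA_step 1 1 (by omega) (by omega)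
    simpa [luckyA_one] using this
  simp [G, seg, List.range_succ, h2, h3]

theorem two_le_two_pow (d : Nat) (hd : 1 ≤ d) : 2 ≤ 2 ^ d := by
  have h : (2:Nat) ^ 1 ≤ 2 ^ d := Nat.pow_le_pow_right (by omega) hd
  simpa using h

-- A's loop over one index segment equals consume over the corresponding values
theorem loopA_consume (x : Int) : ∀ (n i : Nat) (s prv : Int), 2 ≤ i → prv < x → (i : Int) ≤ x + 1 →
    countLoopA x i s prv prv =
      (match consume x (seg i n) s prv with
       | .inl s' => s'
       | .inr (s', prv') => countLoopA x (i + n) s' prv' prv') := by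
  intro n
  induction n with
  | zero =>
    intro i s prv _ _ _
    simp [seg, consume]
  | succ n ih =>
    intro i s prv hi hprv hix
    rw [seg_succ]
    rw [countLoopA, dif_pos ⟨hprv, hix⟩]
    simp only
    by_cases hx : x ≤ luckyA i
    · simp only [consume, if_pos hx]
      rw [min_eq_right hx]
      rw [countLoopA, dif_neg (by omega)]
    · rw [not_le] at hx
      simp only [consume, if_neg (not_le.mpr hx)]
      rw [min_eq_left (le_of_lt hx)]
      have hlb := luckyA_lb i hi
      have := ih (i + 1) (s + luckyA i * (luckyA i - prv)) (luckyA i)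
        (by omega) hx (by omega)
      rw [this]
      have : i + 1 + n = i + (n + 1) := by omega
      rw [this]

-- when consume exhausts a nonempty segment, the carried prv' is the last value and < x
theorem consume_inr_seg (x : Int) : ∀ (n i : Nat) (s prv s' prv' : Int),
    consume x (seg i (n + 1)) s prv = .inr (s', prv') →
    prv' = luckyA (i + n) ∧ prv' < x := by
  intro n
  induction n with
  | zero =>
    intro i s prv s' prv' h
    rw [seg_succ] at h
    simp only [seg, List.range_zero, List.map_nil, consume] at h
    split at h
    · exact absurd h (by simp)
    · rename_i hv
      simp only [Sum.inr.injEq, Prod.mk.injEq] at h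
      simp only [Nat.add_zero]
      exact ⟨h.2.symm, by omega⟩
  | succ n ih =>
    intro i s prv s' prv' h
    rw [seg_succ] at h
    simp only [consume] at h
    split at h
    · exact absurd h (by simp)
    · rename_i hv
      have := ih (i + 1) _ _ _ _ h
      refine ⟨by rw [this.1]; congr 1; omega, this.2⟩

theorem foldPair_append (x : Int) (l1 l2 : List Int) (p : Int × Int) :
    foldPair x (l1 ++ l2) p = foldPair x l2 (foldPair x l1 p) := by
  simp [foldPair, List.foldl_append]

-- scanGen/consume in lockstep: the break case
theorem scan_consume_inl (x : Int) : ∀ (l : List Int) (s prv s' : Int),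
    consume x l s prv = .inl s' →
    (scanGen x l).2 = true ∧ foldB x (scanGen x l).1 s prv = s' := by
  intro l
  induction l with
  | nil => intro s prv s' h; simp [consume] at h
  | cons v rest ih =>
    intro s prv s' h
    simp only [consume] at h
    by_cases hv : x ≤ v
    · rw [if_pos hv] at h
      simp only [Sum.inl.injEq] at h
      simp [scanGen, if_pos hv, foldB, foldPair, min_eq_right hv, h]
    · rw [if_neg hv] at h
      have := ih _ _ _ h
      simp only [scanGen, if_neg hv]
      refine ⟨this.1, ?_⟩
      simp only [foldB, foldPair, List.foldl_cons] at this ⊢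
      rw [min_eq_left (by omega)]
      exact this.2

-- scanGen/consume in lockstep: the exhausted case
theorem scan_consume_inr (x : Int) : ∀ (l : List Int) (s prv s' prv' : Int),
    consume x l s prv = .inr (s', prv') →
    scanGen x l = (l, false) ∧ foldPair x l (s, prv) = (s', prv') := by
  intro l
  induction l with
  | nil =>
    intro s prv s' prv' h
    simp only [consume, Sum.inr.injEq, Prod.mk.injEq] at h
    exact ⟨rfl, by simp [foldPair, h.1, h.2]⟩
  | cons v rest ih =>
    intro s prv s' prv' h
    simp only [consume] at h
    by_cases hv : x ≤ v
    · rw [if_pos hv] at h; exact absurd h (by simp)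
    · rw [if_neg hv] at h
      have := ih _ _ _ _ h
      simp only [scanGen, if_neg hv, this.1]
      refine ⟨trivial, ?_⟩
      simp only [foldPair, List.foldl_cons] at this ⊢
      rw [min_eq_left (by omega)]
      exact this.2

-- B's build-then-fold equals consume, generation by generation
theorem foldB_build (x : Int) (gen : List Int) (f : Nat) (s prv : Int) :
    foldB x (build x gen (f + 1)) s prv =
      (match consume x gen s prv with
       | .inl s' => s'
       | .inr (s', prv') => foldB x (build x (nextGen gen) f) s' prv') := by
  cases hc : consume x gen s prv with
  | inl s' =>
    have h := scan_consume_inl x gen s prv s' hc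
    simp only [build, h.1, if_true]
    exact h.2
  | inr p =>
    have h := scan_consume_inr x gen s prv p.1 p.2 (by rw [hc])
    simp only [build, h.1, Bool.false_eq_true, if_false, foldB, foldPair_append]
    rw [show foldPair x gen (s, prv) = (p.1, p.2) from h.2]

-- main induction: A's loop from index 2^d equals B's fold over the remaining table
theorem main_loop (x : Int) : ∀ (f d : Nat) (s prv : Int), 1 ≤ d → prv < x →
    ((2 ^ d : Nat) : Int) ≤ x + 1 → x ≤ 4 * 10 ^ (d - 1 + f) →
    countLoopA x (2 ^ d) s prv prv = foldB x (build x (G d) (f + 1)) s prv := by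
  intro f
  induction f with
  | zero =>
    intro d s prv hd hprv hix hxb
    rw [loopA_consume x (2 ^ d) (2 ^ d) s prv (two_le_two_pow d hd) hprv hix, foldB_build,
        show seg (2 ^ d) (2 ^ d) = G d from rfl]
    cases hc : consume x (G d) s prv with
    | inl s' => rfl
    | inr p =>
      exfalso
      -- all of G d was consumed below x, but its first element is ≥ 4*10^(d-1) ≥ x
      have hpow : (2:Nat) ^ d = (2 ^ d - 1) + 1 := by
        have := Nat.one_le_two_pow (n := d); omega
      have hfirst := luckyA_pow_lb d hd
      have hge : x ≤ luckyA (2 ^ d) := by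
        simp only [Nat.add_zero] at hxb; omega
      have hc' : consume x (seg (2 ^ d) ((2 ^ d - 1) + 1)) s prv = .inr p := by
        rw [← hpow]; exact hc
      rw [seg_succ] at hc'
      simp only [consume, if_pos hge] at hc'
      exact absurd hc' (by simp)
  | succ f ih =>
    intro d s prv hd hprv hix hxb
    rw [loopA_consume x (2 ^ d) (2 ^ d) s prv (two_le_two_pow d hd) hprv hix, foldB_build,
        show seg (2 ^ d) (2 ^ d) = G d from rfl]
    cases hc : consume x (G d) s prv with
    | inl s' => rfl
    | inr p =>
      have hpow : (2:Nat) ^ d = (2 ^ d - 1) + 1 := by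
        have := Nat.one_le_two_pow (n := d); omega
      have hc' : consume x (seg (2 ^ d) ((2 ^ d - 1) + 1)) s prv = .inr (p.1, p.2) := by
        rw [← hpow]; exact hc
      have hlast := consume_inr_seg x (2 ^ d - 1) (2 ^ d) s prv p.1 p.2 hc'
      have hidx : 2 ^ d + (2 ^ d - 1) = 2 ^ (d + 1) - 1 := by
        have h1 := Nat.one_le_two_pow (n := d)
        have : (2:Nat) ^ (d + 1) = 2 * 2 ^ d := by ring
        omega
      have hlb : ((2 ^ (d + 1) - 1 : Nat) : Int) ≤ p.2 := by
        rw [hlast.1, hidx]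
        apply luckyA_lb
        have : (2:Nat) ^ (d + 1) = 2 * 2 ^ d := by ring
        have h1 := two_le_two_pow d hd
        omega
      have hsum : 2 ^ d + 2 ^ d = 2 ^ (d + 1) := by ring
      have hix' : ((2 ^ (d + 1) : Nat) : Int) ≤ x + 1 := by
        have h1 := Nat.one_le_two_pow (n := d + 1)
        have h2 : ((2 ^ (d + 1) - 1 : Nat) : Int) = ((2 ^ (d + 1) : Nat) : Int) - 1 := by
          push_cast [h1]; ring
        have := hlast.2
        omega
      rw [hsum, ← G_succ]
      exact ih (d + 1) p.1 p.2 (by omega) hlast.2 hix'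
        (by have : d + 1 - 1 + f = d - 1 + (f + 1) := by omega
            rw [this]; exact hxb)

-- ===== VERDICT (by name: the statement is the Claim_ definition above) =====
theorem count_spec : Claim_equal_count := by
  intro x hdom
  unfold Spec_count count count_alt
  by_cases hx : x ≤ 0
  · simp [hx]
  · rw [if_neg hx, if_neg hx]
    rw [not_le] at hx
    have hdom' : x ≤ 2147483648 := by
      simp only [Dom_count, pvDomInt, decide_eq_true_eq] at hdom
      exact hdom.2
    have h := main_loop x 11 1 0 0 (by omega) (by omega)
      (by norm_num; omega) (by norm_num; omega)
    simp only [pow_one, G_one] at h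
    simpa [foldB, foldPair] using h
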